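-- pv_equiv track=rewrite | github.com/miethe/deal-brain | apps/api/dealbrain_api/adapters/router.py | _domain_matches
-- ===== SOURCE A (Python) =====
-- def _domain_matches(url_domain: str, adapter_domains: list[str]) -> bool:
--     """
--     Check if URL domain matches any of adapter's domains.
--
--     Implements matching rules:
--     - Wildcard "*" matches any domain
--     - Exact match: "ebay.com" matches "ebay.com"
--     - Subdomain already normalized by _extract_domain()
--
--     Args:
--         url_domain: Normalized domain from URL (e.g., "ebay.com")
--         adapter_domains: List of domains from adapter (e.g., ["ebay.com", "www.ebay.com"])
--
--     Returns:
--         True if URL domain matches any adapter domain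
--     """
--     # Check for wildcard match
--     if "*" in adapter_domains:
--         return True
--
--     # Normalize adapter domains and check for exact match
--     for adapter_domain in adapter_domains:
--         normalized_adapter_domain = adapter_domain.lower()
--
--         # Strip www/m prefix from adapter domain for comparison
--         if normalized_adapter_domain.startswith("www."):
--             normalized_adapter_domain = normalized_adapter_domain[4:]
--         elif normalized_adapter_domain.startswith("m."):
--             normalized_adapter_domain = normalized_adapter_domain[2:]
--
--         if url_domain == normalized_adapter_domain:
--             return True
--
--     return False
-- ===== SOURCE B (Python) =====
-- def _domain_matches(url_domain: str, adapter_domains: list[str]) -> bool: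
--     # Invert the normalization: precompute the raw adapter forms that would
--     # match url_domain, then test each (lowercased) adapter against that set.
--     if "*" in adapter_domains:
--         return True
--     candidates = {url_domain, "www." + url_domain, "m." + url_domain}
--     return any(adapter_domain.lower() in candidates for adapter_domain in adapter_domains)
-- ===== Notes on version B (the rewrite author's own statement) =====
-- stated objective: alternative
-- what changed: B inverts the normalization direction: instead of stripping www./m. prefixes off every lowercased adapter domain and comparing to url_domain, it precomputes once the set {url_domain, 'www.'+url_domain, 'm.'+url_domain} and tests each lowercased adapter for membership with any().
-- outside the precondition, e.g. on _domain_matches('www.x', ['www.x']): A returns False, B returns True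
import Mathlib
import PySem

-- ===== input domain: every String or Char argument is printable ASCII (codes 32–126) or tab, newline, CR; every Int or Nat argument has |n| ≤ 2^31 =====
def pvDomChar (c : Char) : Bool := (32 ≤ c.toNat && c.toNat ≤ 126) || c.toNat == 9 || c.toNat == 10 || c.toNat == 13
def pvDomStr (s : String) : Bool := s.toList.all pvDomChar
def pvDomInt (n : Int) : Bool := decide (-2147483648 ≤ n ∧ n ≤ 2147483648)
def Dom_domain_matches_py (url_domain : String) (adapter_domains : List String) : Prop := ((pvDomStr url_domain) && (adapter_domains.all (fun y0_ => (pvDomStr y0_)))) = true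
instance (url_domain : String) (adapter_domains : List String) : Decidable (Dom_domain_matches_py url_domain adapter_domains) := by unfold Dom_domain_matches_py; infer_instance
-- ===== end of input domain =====

-- B inverts the normalization direction: it precomputes the set of raw adapter forms that
-- would match url_domain and tests each lowercased adapter for membership (alternative; same cost).

-- ===== PORT A =====
def pvStripA (l : String) : String :=
  if PySem.Str.startswith l "www." then PySem.Str.slice l (some 4) none
  else if PySem.Str.startswith l "m." then PySem.Str.slice l (some 2) none
  else l

def pvGoA (url_domain : String) : List String → Bool
  | [] => false
  | adapter_domain :: rest =>
    let n := pvStripA (PySem.Str.lower adapter_domain)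
    if url_domain == n then true else pvGoA url_domain rest

def domain_matches_py (url_domain : String) (adapter_domains : List String) : Bool :=
  if adapter_domains.contains "*" then true
  else pvGoA url_domain adapter_domains

-- ===== PORT B =====
def domain_matches_py_alt (url_domain : String) (adapter_domains : List String) : Bool :=
  if adapter_domains.contains "*" then true
  else
    let candidates : PySem.Set String :=
      PySem.Set.ofList [url_domain, "www." ++ url_domain, "m." ++ url_domain]
    adapter_domains.any (fun adapter_domain =>
      PySem.Set.contains candidates (PySem.Str.lower adapter_domain))

-- ===== PRECONDITION & SPEC =====
-- Pre_ excludes only the corner where url_domain itself still begins with "www." or "m."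
-- (the docstring requires it already normalized by _extract_domain()) AND some adapter
-- lowercases to exactly that unnormalized domain: there A's stripped comparison (no
-- self-match) and B's exact self-match are both defensible readings.
def Pre_domain_matches_py (url_domain : String) (adapter_domains : List String) : Prop :=
  (PySem.Str.startswith url_domain "www." = false ∧ PySem.Str.startswith url_domain "m." = false)
  ∨ (∀ a ∈ adapter_domains, PySem.Str.lower a ≠ url_domain)

instance (url_domain : String) (adapter_domains : List String) : Decidable (Pre_domain_matches_py url_domain adapter_domains) := by unfold Pre_domain_matches_py; infer_instance

def pvWitness_domain_matches_py : String × List String := ("ebay.com", ["www.ebay.com", "*"])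

def Spec_domain_matches_py (url_domain : String) (adapter_domains : List String) (out : Bool) : Prop := out = domain_matches_py_alt url_domain adapter_domains
instance (url_domain : String) (adapter_domains : List String) (out : Bool) : Decidable (Spec_domain_matches_py url_domain adapter_domains out) := by unfold Spec_domain_matches_py; infer_instance

-- ===== CLAIM (what is proved, stated in full; the proofs are below) =====
def Claim_equal_domain_matches_py : Prop := ∀ (url_domain : String) (adapter_domains : List String), Dom_domain_matches_py url_domain adapter_domains → Pre_domain_matches_py url_domain adapter_domains → Spec_domain_matches_py url_domain adapter_domains (domain_matches_py url_domain adapter_domains)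

-- ===== LEMMAS AND PROOFS =====

theorem pvStrEq (a b : String) : a = b ↔ a.toList = b.toList :=
  ⟨fun h => h ▸ rfl, fun h => String.toList_injective h⟩

theorem pvNotPre (s p : String) (h : PySem.Str.startswith s p = false) :
    ¬ (p.toList <+: s.toList) := by
  intro hp
  rw [PySem.Str.startswith_eq] at h
  rw [← PySem.Chars.startswith_iff] at hp
  rw [hp] at h
  exact Bool.true_eq_false.mp h

theorem pvSliceDrop (l : String) (k : Nat) :
    (PySem.Str.slice l (some (k : Int)) none).toList = l.toList.drop k := by
  have := PySem.Str.toList_slice l (some (k : Int)) none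
  rw [this, PySem.Chars.slice_eq_listSlice, PySem.List.slice_from_natCast]

theorem pvContains (u l : String) :
    (PySem.Set.contains (PySem.Set.ofList [u, "www." ++ u, "m." ++ u]) l = true)
      ↔ (l = u ∨ l = "www." ++ u ∨ l = "m." ++ u) := by
  simp [PySem.Set.contains, PySem.Set.mem_ofList]

theorem pvKey (u l : String)
    (h1 : PySem.Str.startswith u "www." = false)
    (h2 : PySem.Str.startswith u "m." = false) :
    (u == pvStripA l) =
      PySem.Set.contains (PySem.Set.ofList [u, "www." ++ u, "m." ++ u]) l := by
  have hU1 : ¬ ("www.".toList <+: u.toList) := pvNotPre u "www." h1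
  have hU2 : ¬ ("m.".toList <+: u.toList) := pvNotPre u "m." h2
  have hW : "www.".toList = ['w','w','w','.'] := by decide
  have hM : "m.".toList = ['m','.'] := by decide
  have hrhs := pvContains u l
  rw [Bool.eq_iff_iff]
  simp only [beq_iff_eq]
  rw [hrhs]
  unfold pvStripA
  by_cases hw : PySem.Str.startswith l "www." = true
  · rw [if_pos hw]
    rw [PySem.Str.startswith_eq, PySem.Chars.startswith_iff] at hw
    obtain ⟨T, hT⟩ := hw
    have hstrip : (PySem.Str.slice l (some 4) none).toList = T := by
      rw [show ((4 : Int) = ((4 : Nat) : Int)) from rfl, pvSliceDrop, ← hT, hW]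
      rfl
    constructor
    · intro he
      right; left
      rw [pvStrEq] at he ⊢
      rw [String.toList_append, ← hT, hstrip] at *
      rw [he]
    · rintro (h | h | h) <;> rw [pvStrEq] at h ⊢
      · exfalso
        exact hU1 ⟨T, by rw [← h, hT]⟩
      · rw [String.toList_append] at h
        rw [← hT] at h
        have := List.append_cancel_left h
        rw [hstrip, ← this]
      · exfalso
        rw [String.toList_append, ← hT, hW, hM] at h
        simp at h
  · rw [if_neg hw]
    have hw' : ¬ ("www.".toList <+: l.toList) :=
      pvNotPre l "www." (Bool.eq_false_iff.mpr hw)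
    by_cases hm : PySem.Str.startswith l "m." = true
    · rw [if_pos hm]
      rw [PySem.Str.startswith_eq, PySem.Chars.startswith_iff] at hm
      obtain ⟨T, hT⟩ := hm
      have hstrip : (PySem.Str.slice l (some 2) none).toList = T := by
        rw [show ((2 : Int) = ((2 : Nat) : Int)) from rfl, pvSliceDrop, ← hT, hM]
        rfl
      constructor
      · intro he
        right; right
        rw [pvStrEq] at he ⊢
        rw [String.toList_append, ← hT, hstrip] at *
        rw [he]
      · rintro (h | h | h) <;> rw [pvStrEq] at h ⊢
        · exfalso
          exact hU2 ⟨T, by rw [← h, hT]⟩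
        · exfalso
          rw [String.toList_append, ← hT, hW, hM] at h
          simp at h
        · rw [String.toList_append] at h
          rw [← hT] at h
          have := List.append_cancel_left h
          rw [hstrip, ← this]
    · rw [if_neg hm]
      have hm' : ¬ ("m.".toList <+: l.toList) :=
        pvNotPre l "m." (Bool.eq_false_iff.mpr hm)
      constructor
      · intro he
        left
        rw [pvStrEq] at he ⊢
        rw [he]
      · rintro (h | h | h) <;> rw [pvStrEq] at h ⊢
        · rw [h]
        · exfalso
          exact hw' ⟨u.toList, by rw [h, String.toList_append]⟩
        · exfalso
          exact hm' ⟨u.toList, by rw [h, String.toList_append]⟩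

theorem pvKey2 (u l : String) (hne : l ≠ u) :
    (u == pvStripA l) =
      PySem.Set.contains (PySem.Set.ofList [u, "www." ++ u, "m." ++ u]) l := by
  have hW : "www.".toList = ['w','w','w','.'] := by decide
  have hM : "m.".toList = ['m','.'] := by decide
  rw [Bool.eq_iff_iff]
  simp only [beq_iff_eq]
  rw [pvContains u l]
  unfold pvStripA
  by_cases hw : PySem.Str.startswith l "www." = true
  · rw [if_pos hw]
    rw [PySem.Str.startswith_eq, PySem.Chars.startswith_iff] at hw
    obtain ⟨T, hT⟩ := hw
    have hstrip : (PySem.Str.slice l (some 4) none).toList = T := by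
      rw [show ((4 : Int) = ((4 : Nat) : Int)) from rfl, pvSliceDrop, ← hT, hW]
      rfl
    constructor
    · intro he
      right; left
      rw [pvStrEq] at he ⊢
      rw [String.toList_append, ← hT, hstrip] at *
      rw [he]
    · rintro (h | h | h)
      · exact absurd h hne
      · rw [pvStrEq] at h ⊢
        rw [String.toList_append] at h
        rw [← hT] at h
        have := List.append_cancel_left h
        rw [hstrip, ← this]
      · exfalso
        rw [pvStrEq, String.toList_append, ← hT, hW, hM] at h
        simp at h
  · rw [if_neg hw]
    have hw' : ¬ ("www.".toList <+: l.toList) :=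
      pvNotPre l "www." (Bool.eq_false_iff.mpr hw)
    by_cases hm : PySem.Str.startswith l "m." = true
    · rw [if_pos hm]
      rw [PySem.Str.startswith_eq, PySem.Chars.startswith_iff] at hm
      obtain ⟨T, hT⟩ := hm
      have hstrip : (PySem.Str.slice l (some 2) none).toList = T := by
        rw [show ((2 : Int) = ((2 : Nat) : Int)) from rfl, pvSliceDrop, ← hT, hM]
        rfl
      constructor
      · intro he
        right; right
        rw [pvStrEq] at he ⊢
        rw [String.toList_append, ← hT, hstrip] at *
        rw [he]
      · rintro (h | h | h)
        · exact absurd h hne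
        · exfalso
          rw [pvStrEq, String.toList_append, ← hT, hW, hM] at h
          simp at h
        · rw [pvStrEq] at h ⊢
          rw [String.toList_append] at h
          rw [← hT] at h
          have := List.append_cancel_left h
          rw [hstrip, ← this]
    · rw [if_neg hm]
      have hm' : ¬ ("m.".toList <+: l.toList) :=
        pvNotPre l "m." (Bool.eq_false_iff.mpr hm)
      constructor
      · intro he
        exact absurd he.symm hne
      · rintro (h | h | h)
        · exact absurd h hne
        · exact absurd ⟨u.toList, by rw [pvStrEq] at h; rw [h, String.toList_append]⟩ hw'
        · exact absurd ⟨u.toList, by rw [pvStrEq] at h; rw [h, String.toList_append]⟩ hm'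

theorem pvGo_eq (u : String) (ads : List String)
    (hpre : Pre_domain_matches_py u ads) :
    pvGoA u ads = ads.any (fun d =>
      PySem.Set.contains (PySem.Set.ofList [u, "www." ++ u, "m." ++ u])
        (PySem.Str.lower d)) := by
  induction ads with
  | nil => rfl
  | cons a rest ih =>
    have hpre' : Pre_domain_matches_py u rest := by
      rcases hpre with h | h
      · exact Or.inl h
      · exact Or.inr fun b hb => h b (List.mem_cons_of_mem a hb)
    simp only [pvGoA, List.any_cons, ih hpre']
    have hkey : (u == pvStripA (PySem.Str.lower a)) =
        PySem.Set.contains (PySem.Set.ofList [u, "www." ++ u, "m." ++ u])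
          (PySem.Str.lower a) := by
      rcases hpre with ⟨h1, h2⟩ | hall
      · exact pvKey u (PySem.Str.lower a) h1 h2
      · exact pvKey2 u (PySem.Str.lower a) (hall a List.mem_cons_self)
    rw [← hkey]
    cases h : (u == pvStripA (PySem.Str.lower a)) <;> simp

-- ===== VERDICT (by name: the statement is the Claim_ definition above) =====
theorem domain_matches_py_spec : Claim_equal_domain_matches_py := by
  intro u ads _hD hP
  unfold Spec_domain_matches_py domain_matches_py domain_matches_py_alt
  by_cases hw : ads.contains "*" = true
  · rw [if_pos hw, if_pos hw]
  · rw [if_neg hw, if_neg hw]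
    exact pvGo_eq u ads hP
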